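-- pv_equiv track=rewrite | github.com/alderban107/hypixel-skyblock | tools/sbxp.py | calc_skill_sbxp
-- ===== SOURCE A (Python) =====
-- SKILL_XP_THRESHOLDS = [
--     0, 50, 175, 375, 675, 1175, 1925, 2925, 4425, 6425, 9925,
--     14925, 22425, 32425, 47425, 67425, 97425, 147425, 222425, 322425, 522425,
--     822425, 1222425, 1722425, 2322425, 3022425, 3822425, 4722425, 5722425, 6822425, 8022425,
--     9322425, 10722425, 12222425, 13822425, 15522425, 17322425, 19222425, 21222425, 23322425, 25522425,
--     27822425, 30222425, 32722425, 35322425, 38072425, 40972425, 44072425, 47472425, 51172425, 55172425,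
--     59472425, 64072425, 68972425, 74172425, 79672425, 85472425, 91572425, 97972425, 104672425, 111672425,
-- ]
--
-- RUNECRAFTING_XP_THRESHOLDS = [
--     0, 50, 150, 275, 435, 635, 885, 1200, 1600, 2100, 2725,
--     3510, 4510, 5760, 7325, 9325, 11825, 14950, 18950, 23950, 30200,
--     38050, 47850, 60100, 75400, 94450,
-- ]
--
-- SKILL_MAX_LEVELS = {
--     "farming": 60, "mining": 60, "combat": 60, "foraging": 54,
--     "fishing": 50, "enchanting": 60, "alchemy": 50, "taming": 60,
--     "carpentry": 50, "social": 25, "runecrafting": 25, "hunting": 25,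
-- }
--
-- ALL_SKILLS = [
--     "farming", "mining", "combat", "foraging", "fishing",
--     "enchanting", "alchemy", "taming", "carpentry",
--     "runecrafting", "social", "hunting",
-- ]
--
-- def xp_to_level(xp, thresholds, max_level=None):
--     """Convert XP to level using cumulative thresholds."""
--     level = 0
--     for i, threshold in enumerate(thresholds):
--         if xp >= threshold:
--             level = i
--         else:
--             break
--     if max_level:
--         level = min(level, max_level)
--     return level
--
-- def calc_skill_sbxp(member):
--     """Calculate SBXP from all skill levels.
--
--     Returns (current_xp, max_xp, details) where details is a list of
--     (skill_name, level, max_level, sbxp_from_this_skill).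
--     """
--     skills_xp = member.get("player_data", {}).get("experience", {})
--     total_sbxp = 0
--     details = []
--
--     for skill in ALL_SKILLS:
--         raw_xp = skills_xp.get(f"SKILL_{skill.upper()}", 0)
--         max_lvl = SKILL_MAX_LEVELS.get(skill, 50)
--         if skill in ("runecrafting", "social"):
--             thresholds = RUNECRAFTING_XP_THRESHOLDS
--         else:
--             thresholds = SKILL_XP_THRESHOLDS
--         level = xp_to_level(raw_xp, thresholds, max_lvl)
--
--         # Calculate SBXP for this skill
--         sbxp = 0
--         for lvl in range(1, level + 1):
--             if lvl <= 10:
--                 sbxp += 5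
--             elif lvl <= 25:
--                 sbxp += 10
--             elif lvl <= 50:
--                 sbxp += 20
--             else:
--                 sbxp += 30
--
--         total_sbxp += sbxp
--         details.append((skill, level, max_lvl, sbxp))
--
--     return total_sbxp, 7800, details
-- ===== SOURCE B (Python) =====
-- SKILL_XP_THRESHOLDS = [
--     0, 50, 175, 375, 675, 1175, 1925, 2925, 4425, 6425, 9925,
--     14925, 22425, 32425, 47425, 67425, 97425, 147425, 222425, 322425, 522425,
--     822425, 1222425, 1722425, 2322425, 3022425, 3822425, 4722425, 5722425, 6822425, 8022425,
--     9322425, 10722425, 12222425, 13822425, 15522425, 17322425, 19222425, 21222425, 23322425, 25522425,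
--     27822425, 30222425, 32722425, 35322425, 38072425, 40972425, 44072425, 47472425, 51172425, 55172425,
--     59472425, 64072425, 68972425, 74172425, 79672425, 85472425, 91572425, 97972425, 104672425, 111672425,
-- ]
--
-- RUNECRAFTING_XP_THRESHOLDS = [
--     0, 50, 150, 275, 435, 635, 885, 1200, 1600, 2100, 2725,
--     3510, 4510, 5760, 7325, 9325, 11825, 14950, 18950, 23950, 30200,
--     38050, 47850, 60100, 75400, 94450,
-- ]
--
-- SKILL_MAX_LEVELS = {
--     "farming": 60, "mining": 60, "combat": 60, "foraging": 54,
--     "fishing": 50, "enchanting": 60, "alchemy": 50, "taming": 60,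
--     "carpentry": 50, "social": 25, "runecrafting": 25, "hunting": 25,
-- }
--
-- ALL_SKILLS = [
--     "farming", "mining", "combat", "foraging", "fishing",
--     "enchanting", "alchemy", "taming", "carpentry",
--     "runecrafting", "social", "hunting",
-- ]
--
--
-- def _level_of(xp, thresholds, max_level):
--     """Binary search: (number of thresholds <= xp) - 1, clamped to [0, max_level]."""
--     lo, hi = 0, len(thresholds)
--     while lo < hi:
--         mid = (lo + hi) // 2
--         if thresholds[mid] <= xp:
--             lo = mid + 1
--         else:
--             hi = mid
--     return min(max(lo - 1, 0), max_level)
--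
--
-- def _band_sbxp(level):
--     """Closed-form SBXP for a skill at `level` (5/lvl to 10, 10 to 25, 20 to 50, 30 past 50)."""
--     return (5 * min(level, 10)
--             + 10 * max(0, min(level, 25) - 10)
--             + 20 * max(0, min(level, 50) - 25)
--             + 30 * max(0, level - 50))
--
--
-- def calc_skill_sbxp(member):
--     skills_xp = member.get("player_data", {}).get("experience", {})
--     total_sbxp = 0
--     details = []
--     for skill in ALL_SKILLS:
--         if skill in ("runecrafting", "social"):
--             thresholds = RUNECRAFTING_XP_THRESHOLDS
--         else:
--             thresholds = SKILL_XP_THRESHOLDS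
--         max_lvl = SKILL_MAX_LEVELS.get(skill, 50)
--         level = _level_of(skills_xp.get("SKILL_" + skill.upper(), 0), thresholds, max_lvl)
--         sbxp = _band_sbxp(level)
--         total_sbxp += sbxp
--         details.append((skill, level, max_lvl, sbxp))
--     return total_sbxp, 7800, details
-- ===== Notes on version B (the rewrite author's own statement) =====
-- stated objective: simpler
-- what changed: The per-level inner accumulation loop is replaced by a piecewise closed-form band formula, and the linear threshold scan in xp_to_level is replaced by a hand-written binary search (count of thresholds <= xp) with clamping.
import Mathlib
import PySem

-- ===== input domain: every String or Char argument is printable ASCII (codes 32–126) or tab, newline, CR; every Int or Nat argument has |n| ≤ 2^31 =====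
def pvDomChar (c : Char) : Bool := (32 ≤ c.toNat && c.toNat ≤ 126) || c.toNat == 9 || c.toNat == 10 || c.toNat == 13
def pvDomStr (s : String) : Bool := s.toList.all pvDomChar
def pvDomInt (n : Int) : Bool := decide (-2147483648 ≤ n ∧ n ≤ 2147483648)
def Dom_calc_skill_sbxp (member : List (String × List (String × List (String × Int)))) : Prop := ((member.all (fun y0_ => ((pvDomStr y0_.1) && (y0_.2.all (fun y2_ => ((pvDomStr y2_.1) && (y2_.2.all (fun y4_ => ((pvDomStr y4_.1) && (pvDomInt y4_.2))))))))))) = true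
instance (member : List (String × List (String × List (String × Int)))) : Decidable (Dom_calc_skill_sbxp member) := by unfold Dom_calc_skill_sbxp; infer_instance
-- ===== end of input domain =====

-- B replaces A's per-level accumulation loop by a closed-form band formula and the linear
-- threshold scan by a binary search; same return value, chosen for simplicity/clarity.

-- ===== PORT A =====
def pySKILL_XP_THRESHOLDS : List Int := [
    0, 50, 175, 375, 675, 1175, 1925, 2925, 4425, 6425, 9925,
    14925, 22425, 32425, 47425, 67425, 97425, 147425, 222425, 322425, 522425,
    822425, 1222425, 1722425, 2322425, 3022425, 3822425, 4722425, 5722425, 6822425, 8022425,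
    9322425, 10722425, 12222425, 13822425, 15522425, 17322425, 19222425, 21222425, 23322425, 25522425,
    27822425, 30222425, 32722425, 35322425, 38072425, 40972425, 44072425, 47472425, 51172425, 55172425,
    59472425, 64072425, 68972425, 74172425, 79672425, 85472425, 91572425, 97972425, 104672425, 111672425]

def pyRUNECRAFTING_XP_THRESHOLDS : List Int := [
    0, 50, 150, 275, 435, 635, 885, 1200, 1600, 2100, 2725,
    3510, 4510, 5760, 7325, 9325, 11825, 14950, 18950, 23950, 30200,
    38050, 47850, 60100, 75400, 94450]

def pySKILL_MAX_LEVELS : List (String × Int) := [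
    ("farming", 60), ("mining", 60), ("combat", 60), ("foraging", 54),
    ("fishing", 50), ("enchanting", 60), ("alchemy", 50), ("taming", 60),
    ("carpentry", 50), ("social", 25), ("runecrafting", 25), ("hunting", 25)]

def pyALL_SKILLS : List String := [
    "farming", "mining", "combat", "foraging", "fishing",
    "enchanting", "alchemy", "taming", "carpentry",
    "runecrafting", "social", "hunting"]

-- the 'for i, threshold in enumerate(thresholds): if xp >= threshold: level = i else: break' loop
def xpScanLoop (xp : Int) : List (Int × Int) → Int → Int
  | [], level => level
  | (i, t) :: rest, level => if xp ≥ t then xpScanLoop xp rest i else level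

def xp_to_level (xp : Int) (thresholds : List Int) (max_level : Int) : Int :=
  let level := xpScanLoop xp (PySem.List.enumerate thresholds 0) 0
  if max_level ≠ 0 then min level max_level else level   -- 'if max_level:' truthiness

def calc_skill_sbxp (member : List (String × List (String × List (String × Int)))) : Int × Int × (List (String × Int × Int × Int)) :=
  let skills_xp := PySem.Dict.getD ⟨PySem.Dict.getD ⟨member⟩ "player_data" []⟩ "experience" []
  let res := pyALL_SKILLS.foldl (fun (acc : Int × List (String × Int × Int × Int)) skill =>
    let raw_xp := PySem.Dict.getD ⟨skills_xp⟩ (String.ofList ("SKILL_".toList ++ PySem.Chars.upper skill.toList)) 0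
    let max_lvl := PySem.Dict.getD ⟨pySKILL_MAX_LEVELS⟩ skill 50
    let thresholds := if skill = "runecrafting" ∨ skill = "social" then pyRUNECRAFTING_XP_THRESHOLDS else pySKILL_XP_THRESHOLDS
    let level := xp_to_level raw_xp thresholds max_lvl
    let sbxp := (PySem.List.pyRange 1 (level + 1) 1).foldl (fun s lvl =>
        if lvl ≤ 10 then s + 5 else if lvl ≤ 25 then s + 10 else if lvl ≤ 50 then s + 20 else s + 30) 0
    (acc.1 + sbxp, acc.2 ++ [(skill, level, max_lvl, sbxp)])) ((0 : Int), ([] : List (String × Int × Int × Int)))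
  (res.1, 7800, res.2)

-- ===== PORT B =====
-- hand-written binary search from Source B: lo ends as the number of thresholds <= xp
def bsearchLoop (ts : List Int) (xp : Int) (lo hi : Nat) : Nat :=
  if lo < hi then
    if PySem.List.pyGetD ts (Int.ofNat ((lo + hi) / 2)) 0 ≤ xp then bsearchLoop ts xp ((lo + hi) / 2 + 1) hi
    else bsearchLoop ts xp lo ((lo + hi) / 2)
  else lo
termination_by hi - lo
decreasing_by all_goals omega

def level_of (xp : Int) (thresholds : List Int) (max_level : Int) : Int :=
  min (max (((bsearchLoop thresholds xp 0 thresholds.length : Nat) : Int) - 1) 0) max_level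

def band_sbxp (level : Int) : Int :=
  5 * min level 10 + 10 * max 0 (min level 25 - 10) + 20 * max 0 (min level 50 - 25) + 30 * max 0 (level - 50)

def calc_skill_sbxp_alt (member : List (String × List (String × List (String × Int)))) : Int × Int × (List (String × Int × Int × Int)) :=
  let skills_xp := PySem.Dict.getD ⟨PySem.Dict.getD ⟨member⟩ "player_data" []⟩ "experience" []
  let res := pyALL_SKILLS.foldl (fun (acc : Int × List (String × Int × Int × Int)) skill =>
    let thresholds := if skill = "runecrafting" ∨ skill = "social" then pyRUNECRAFTING_XP_THRESHOLDS else pySKILL_XP_THRESHOLDS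
    let max_lvl := PySem.Dict.getD ⟨pySKILL_MAX_LEVELS⟩ skill 50
    let level := level_of (PySem.Dict.getD ⟨skills_xp⟩ (String.ofList ("SKILL_".toList ++ PySem.Chars.upper skill.toList)) 0) thresholds max_lvl
    let sbxp := band_sbxp level
    (acc.1 + sbxp, acc.2 ++ [(skill, level, max_lvl, sbxp)])) ((0 : Int), ([] : List (String × Int × Int × Int)))
  (res.1, 7800, res.2)

-- ===== PRECONDITION & SPEC =====
def Spec_calc_skill_sbxp (member : List (String × List (String × List (String × Int)))) (out : Int × Int × (List (String × Int × Int × Int))) : Prop := out = calc_skill_sbxp_alt member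
instance (member : List (String × List (String × List (String × Int)))) (out : Int × Int × (List (String × Int × Int × Int))) : Decidable (Spec_calc_skill_sbxp member out) := by unfold Spec_calc_skill_sbxp; infer_instance

-- ===== CLAIM (what is proved, stated in full; the proofs are below) =====
def Claim_equal_calc_skill_sbxp : Prop := ∀ (member : List (String × List (String × List (String × Int)))), Dom_calc_skill_sbxp member → Spec_calc_skill_sbxp member (calc_skill_sbxp member)

-- ===== LEMMAS AND PROOFS =====

-- A's scan returns (count of thresholds ≤ xp) - 1 on a sorted list (0 if none qualify)
theorem xpScanLoop_eq_count (xp : Int) : ∀ (ts : List Int), ts.Pairwise (· ≤ ·) →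
    ∀ (i lvl : Int), xpScanLoop xp (PySem.List.enumerate ts i) lvl =
      if ts.countP (fun t => decide (t ≤ xp)) = 0 then lvl
      else i + (ts.countP (fun t => decide (t ≤ xp)) : Int) - 1 := by
  intro ts
  induction ts with
  | nil => intro _ i lvl; simp [PySem.List.enumerate, xpScanLoop]
  | cons t rest ih =>
    intro hs i lvl
    rw [List.pairwise_cons] at hs
    rw [PySem.List.enumerate_cons, xpScanLoop]
    by_cases hx : xp ≥ t
    · rw [if_pos hx, ih hs.2 (i + 1) i]
      have : (t :: rest).countP (fun t => decide (t ≤ xp)) = rest.countP (fun t => decide (t ≤ xp)) + 1 := by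
        simp [hx]
      rw [this]
      by_cases h0 : rest.countP (fun t => decide (t ≤ xp)) = 0
      · simp [h0]
      · rw [if_neg h0, if_neg (by omega)]; push_cast; ring
    · rw [if_neg hx]
      have hz : (t :: rest).countP (fun t => decide (t ≤ xp)) = 0 := by
        rw [List.countP_eq_zero]
        intro a ha
        simp only [List.mem_cons] at ha
        rcases ha with rfl | ha
        · simp; omega
        · have := hs.1 a ha; simp; omega
      rw [if_pos hz]

-- on a sorted list, element i is ≤ xp iff i < count of elements ≤ xp
theorem getElem_le_iff_lt_count (xp : Int) : ∀ (ts : List Int), ts.Pairwise (· ≤ ·) →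
    ∀ (i : Nat) (h : i < ts.length), (ts[i] ≤ xp ↔ i < ts.countP (fun t => decide (t ≤ xp))) := by
  intro ts
  induction ts with
  | nil => intro _ i h; simp at h
  | cons t rest ih =>
    intro hs i h
    rw [List.pairwise_cons] at hs
    cases i with
    | zero =>
      simp only [List.getElem_cons_zero, List.countP_cons]
      constructor
      · intro ht; simp [ht]
      · intro hc
        by_contra hnt
        have hz : rest.countP (fun t => decide (t ≤ xp)) = 0 := by
          rw [List.countP_eq_zero]
          intro a ha
          have := hs.1 a ha
          simp only [decide_eq_true_eq]
          omega
        simp [hz, hnt] at hc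
    | succ j =>
      simp only [List.getElem_cons_succ, List.countP_cons]
      rw [ih hs.2 j (by simpa using h)]
      by_cases ht : t ≤ xp
      · simp only [decide_eq_true_eq, ht, if_pos]
        omega
      · have hz : rest.countP (fun t => decide (t ≤ xp)) = 0 := by
          rw [List.countP_eq_zero]
          intro a ha
          have := hs.1 a ha
          simp only [decide_eq_true_eq]
          omega
        simp [hz, ht]

theorem bsearchLoop_eq_count (ts : List Int) (xp : Int) (hs : ts.Pairwise (· ≤ ·)) :
    ∀ (n lo hi : Nat), hi - lo = n →
      lo ≤ ts.countP (fun t => decide (t ≤ xp)) →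
      ts.countP (fun t => decide (t ≤ xp)) ≤ hi →
      hi ≤ ts.length →
      bsearchLoop ts xp lo hi = ts.countP (fun t => decide (t ≤ xp)) := by
  intro n
  induction n using Nat.strong_induction_on with
  | _ n ihn =>
    intro lo hi hn hlo hhi hlen
    rw [bsearchLoop]
    by_cases hlt : lo < hi
    · rw [if_pos hlt]
      have hmid1 : lo ≤ (lo + hi) / 2 := by omega
      have hmid2 : (lo + hi) / 2 < hi := by omega
      have hmlen : (lo + hi) / 2 < ts.length := by omega
      have hget : PySem.List.pyGetD ts (Int.ofNat ((lo + hi) / 2)) 0 = ts[(lo + hi) / 2] := by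
        rw [show (Int.ofNat ((lo + hi) / 2)) = (((lo + hi) / 2 : Nat) : Int) from rfl,
            PySem.List.pyGetD_natCast, List.getD_eq_getElem ts 0 hmlen]
      rw [hget]
      by_cases hc : ts[(lo + hi) / 2] ≤ xp
      · rw [if_pos hc]
        have := (getElem_le_iff_lt_count xp ts hs _ hmlen).mp hc
        exact ihn (hi - ((lo + hi) / 2 + 1)) (by omega) _ _ rfl (by omega) hhi hlen
      · rw [if_neg hc]
        have := mt (getElem_le_iff_lt_count xp ts hs _ hmlen).mpr hc
        exact ihn ((lo + hi) / 2 - lo) (by omega) _ _ rfl hlo (by omega) (by omega)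
    · rw [if_neg hlt]; omega

-- A's level computation equals B's, for sorted thresholds and a positive max level
theorem level_eq (xp : Int) (ts : List Int) (hs : ts.Pairwise (· ≤ ·)) (ml : Int) (hml : 0 < ml) :
    xp_to_level xp ts ml = level_of xp ts ml := by
  unfold xp_to_level level_of
  have hcle : ts.countP (fun t => decide (t ≤ xp)) ≤ ts.length := List.countP_le_length
  rw [xpScanLoop_eq_count xp ts hs 0 0,
      bsearchLoop_eq_count ts xp hs (ts.length - 0) 0 ts.length rfl (by omega) hcle le_rfl]
  rw [if_pos (show ml ≠ 0 by omega)]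
  by_cases h0 : ts.countP (fun t => decide (t ≤ xp)) = 0
  · rw [if_pos h0, h0]
    omega
  · rw [if_neg h0]
    have h1 : 1 ≤ (ts.countP (fun t => decide (t ≤ xp)) : Int) := by exact_mod_cast Nat.one_le_iff_ne_zero.mpr h0
    omega

-- A's per-level accumulation loop equals B's closed-form band formula (for level ≥ 0)
theorem sbxp_loop_eq (level : Int) (h : 0 ≤ level) :
    (PySem.List.pyRange 1 (level + 1) 1).foldl (fun s lvl =>
        if lvl ≤ 10 then s + 5 else if lvl ≤ 25 then s + 10 else if lvl ≤ 50 then s + 20 else s + 30) 0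
      = band_sbxp level := by
  induction level, h using Int.le_induction with
  | base => rw [PySem.List.pyRange_one_eq_nil (by omega)]; simp [band_sbxp]
  | succ n hn ih =>
    rw [PySem.List.pyRange_one_succ_right (by omega : (1 : Int) ≤ n + 1), List.foldl_append, ih]
    simp only [List.foldl_cons, List.foldl_nil, band_sbxp]
    split_ifs <;> omega

theorem max_lvl_pos (skill : String) : 0 < PySem.Dict.getD ⟨pySKILL_MAX_LEVELS⟩ skill 50 := by
  unfold pySKILL_MAX_LEVELS
  simp only [PySem.Dict.getD, PySem.Dict.get?, List.find?]
  repeat' split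
  all_goals norm_num [Option.getD]

theorem sorted_skill_thresholds : pySKILL_XP_THRESHOLDS.Pairwise (· ≤ ·) := by
  unfold pySKILL_XP_THRESHOLDS; decide

theorem sorted_rune_thresholds : pyRUNECRAFTING_XP_THRESHOLDS.Pairwise (· ≤ ·) := by
  unfold pyRUNECRAFTING_XP_THRESHOLDS; decide

-- ===== VERDICT (by name: the statement is the Claim_ definition above) =====
theorem calc_skill_sbxp_spec : Claim_equal_calc_skill_sbxp := by
  intro member _
  unfold Spec_calc_skill_sbxp calc_skill_sbxp calc_skill_sbxp_alt
  simp only []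
  congr 1
  · apply congrArg
    apply List.foldl_ext
    intro acc skill _
    have hts : (if skill = "runecrafting" ∨ skill = "social" then pyRUNECRAFTING_XP_THRESHOLDS else pySKILL_XP_THRESHOLDS).Pairwise (· ≤ ·) := by
      split_ifs
      · exact sorted_rune_thresholds
      · exact sorted_skill_thresholds
    rw [level_eq _ _ hts _ (max_lvl_pos skill)]
    rw [sbxp_loop_eq _ (by unfold level_of; have := max_lvl_pos skill; omega)]
  · congr 1
    apply congrArg
    apply List.foldl_ext
    intro acc skill _
    have hts : (if skill = "runecrafting" ∨ skill = "social" then pyRUNECRAFTING_XP_THRESHOLDS else pySKILL_XP_THRESHOLDS).Pairwise (· ≤ ·) := by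
      split_ifs
      · exact sorted_rune_thresholds
      · exact sorted_skill_thresholds
    rw [level_eq _ _ hts _ (max_lvl_pos skill)]
    rw [sbxp_loop_eq _ (by unfold level_of; have := max_lvl_pos skill; omega)]
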